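-- pv_equiv track=rewrite | github.com/posl/comment_recommendation | script/mod_gen/1_time/zh/249_B/6.py | check
-- ===== SOURCE A (Python) =====
-- def check(s):
--     if len(s) < 2:
--         return False
--     if len(s) % 2 != 0:
--         return False
--     if s[0].isupper() == False:
--         return False
--     if s[-1].islower() == False:
--         return False
--     for i in range(1, len(s)-1):
--         if i % 2 != 0:
--             if s[i].isupper() == True:
--                 return False
--         else:
--             if s[i].islower() == True:
--                 return False
--     return True
-- ===== SOURCE B (Python) =====
-- def check(s):
--     n = len(s)
--     if n < 2 or n % 2 != 0:
--         return False
--     return (s[0].isupper() and s[-1].islower()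
--             and all(not u.islower() and not v.isupper()
--                     for u, v in zip(s[0::2], s[1::2])))
-- ===== Notes on version B (the rewrite author's own statement) =====
-- stated objective: simpler
-- what changed: Replaces A's index loop with parity branching over range(1,len-1) by length guards, strict first/last-character checks, and one pass over the character pairs zip(s[0::2], s[1::2]).
import Mathlib
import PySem

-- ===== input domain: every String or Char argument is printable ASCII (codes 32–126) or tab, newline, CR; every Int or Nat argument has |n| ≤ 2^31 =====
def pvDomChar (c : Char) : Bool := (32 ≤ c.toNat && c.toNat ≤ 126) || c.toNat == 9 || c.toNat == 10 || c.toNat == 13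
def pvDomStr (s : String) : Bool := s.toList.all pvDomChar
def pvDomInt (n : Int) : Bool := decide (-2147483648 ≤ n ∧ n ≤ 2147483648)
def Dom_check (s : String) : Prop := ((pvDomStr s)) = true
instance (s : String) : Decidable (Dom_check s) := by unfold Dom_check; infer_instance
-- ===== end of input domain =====

-- B replaces A's single index loop that branches on index parity by length guards,
-- strict first/last-character checks and one pass over the character pairs (simpler).

-- ===== PORT A =====
-- Literal transliteration of A: the four guard `return False`s in order, then the
-- early-return loop over range(1, len(s)-1) as `.all` over pyRange. Every index A
-- uses is in range, so pyGetD's default ' ' is never read.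
def check (s : String) : Bool :=
  let l := s.toList
  let n : Int := l.length
  if n < 2 then false
  else if n % 2 ≠ 0 then false
  else if PySem.Chars.isupper (PySem.List.pyGetD l 0 ' ') = false then false
  else if PySem.Chars.islower (PySem.List.pyGetD l (-1) ' ') = false then false
  else (PySem.List.pyRange 1 (n - 1) 1).all (fun i =>
    if i % 2 ≠ 0 then !(PySem.Chars.isupper (PySem.List.pyGetD l i ' '))
    else !(PySem.Chars.islower (PySem.List.pyGetD l i ' ')))

-- ===== PORT B =====
-- Source B's `all(... for u, v in zip(s[0::2], s[1::2]))` walks the even- and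
-- odd-index characters in lockstep, i.e. it consumes the string two characters
-- at a time; `pairsOk` is exactly that pass, as structural recursion.
def pairsOk : List Char → Bool
  | u :: v :: rest => (!PySem.Chars.islower u && !PySem.Chars.isupper v) && pairsOk rest
  | _ => true

def check_alt (s : String) : Bool :=
  let l := s.toList
  if l.length < 2 ∨ l.length % 2 ≠ 0 then false
  else
    PySem.Chars.isupper (PySem.List.pyGetD l 0 ' ') &&
    (PySem.Chars.islower (PySem.List.pyGetD l (-1) ' ') && pairsOk l)

-- ===== PRECONDITION & SPEC =====
def Spec_check (s : String) (out : Bool) : Prop := out = check_alt s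
instance (s : String) (out : Bool) : Decidable (Spec_check s out) := by unfold Spec_check; infer_instance

-- ===== CLAIM (what is proved, stated in full; the proofs are below) =====
def Claim_equal_check : Prop := ∀ (s : String), Dom_check s → Spec_check s (check s)

-- ===== LEMMAS AND PROOFS =====

theorem upper_not_lower (c : Char) (h : PySem.Chars.isupper c = true) :
    PySem.Chars.islower c = false := by
  simp [PySem.Chars.isupper, PySem.Chars.islower, Char.le_def,
    UInt32.le_iff_toNat_le, UInt32.lt_iff_toNat_lt] at *
  omega

theorem lower_not_upper (c : Char) (h : PySem.Chars.islower c = true) :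
    PySem.Chars.isupper c = false := by
  simp [PySem.Chars.isupper, PySem.Chars.islower, Char.le_def,
    UInt32.le_iff_toNat_le, UInt32.lt_iff_toNat_lt] at *
  omega

theorem pairsOk_iff (l : List Char) (h : l.length % 2 = 0) :
    pairsOk l = true ↔ ∀ i, (hi : i < l.length) →
      (i % 2 = 0 → PySem.Chars.islower l[i] = false) ∧
      (i % 2 = 1 → PySem.Chars.isupper l[i] = false) := by
  induction l using pairsOk.induct with
  | case1 u v rest ih =>
    simp only [List.length_cons] at h
    have hrest : rest.length % 2 = 0 := by omega
    simp only [pairsOk, Bool.and_eq_true, Bool.not_eq_true'] at *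
    rw [ih hrest]
    constructor
    · rintro ⟨⟨hu, hv⟩, hr⟩ i hi
      match i with
      | 0 => simpa using hu
      | 1 => simpa using hv
      | (j+2) =>
        have := hr j (by simpa using hi)
        simpa [Nat.add_mod_right] using this
    · intro hall
      refine ⟨⟨by simpa using (hall 0 (by simp)).1 rfl, by simpa using (hall 1 (by simp)).2 rfl⟩, ?_⟩
      intro j hj
      have := hall (j+2) (by simpa using hj)
      simpa [Nat.add_mod_right] using this
  | case2 l hne =>
    cases l with
    | nil => simp [pairsOk]
    | cons u t =>
      cases t with
      | nil => simp at h
      | cons v r => exact absurd rfl (hne u v r)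

theorem main_eq (s : String) : check s = check_alt s := by
  unfold check check_alt
  by_cases h2 : s.toList.length < 2
  · have hc : ((s.toList.length : Int)) < 2 := by exact_mod_cast h2
    rw [if_pos hc, if_pos (Or.inl h2)]
  · by_cases hpar : s.toList.length % 2 = 0
    · have hc : ¬ ((s.toList.length : Int)) < 2 := by exact_mod_cast h2
      have hcp : ¬ ((s.toList.length : Int) % 2 ≠ 0) := by omega
      have hguard : ¬ (s.toList.length < 2 ∨ s.toList.length % 2 ≠ 0) := by
        rintro (h | h) <;> omega
      rw [if_neg hc, if_neg hcp, if_neg hguard]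
      by_cases hu : PySem.Chars.isupper (PySem.List.pyGetD s.toList 0 ' ') = true
      · rw [if_neg (by simp [hu]), hu]
        by_cases hlw : PySem.Chars.islower (PySem.List.pyGetD s.toList (-1) ' ') = true
        · rw [if_neg (by simp [hlw]), hlw]
          simp only [Bool.true_and]
          -- core: loop-all = pairsOk
          have hlen : 2 ≤ s.toList.length := by omega
          have hg0 : PySem.List.pyGetD s.toList 0 ' ' = s.toList[0]'(by omega) := by
            rw [PySem.List.pyGetD_eq_getElem s.toList ' ' (by omega) (by push_cast; omega)]
            simp
          have hg1 : PySem.List.pyGetD s.toList (-1) ' ' = s.toList[s.toList.length - 1]'(by omega) := by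
            rw [PySem.List.pyGetD_neg_ofNat s.toList 1 ' ' (by omega) (by omega)]
          rw [hg0] at hu
          rw [hg1] at hlw
          rw [Bool.eq_iff_iff, List.all_eq_true, pairsOk_iff s.toList hpar]
          constructor
          · intro hloop j hj
            rcases Nat.eq_zero_or_pos j with h0 | hjpos
            · subst h0
              exact ⟨fun _ => upper_not_lower _ hu, fun h => by omega⟩
            · rcases eq_or_lt_of_le (Nat.succ_le_of_lt hj) with hlast | hmid
              · have hjeq : j = s.toList.length - 1 := by omega
                subst hjeq
                have hodd : (s.toList.length - 1) % 2 = 1 := by omega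
                exact ⟨fun h => by omega, fun _ => lower_not_upper _ hlw⟩
              · have hloopj := hloop (j : Int) (by
                  rw [PySem.List.mem_pyRange_one]
                  refine ⟨by exact_mod_cast hjpos, by push_cast; omega⟩)
                have hgj : PySem.List.pyGetD s.toList (j : Int) ' ' = s.toList[j]'hj := by
                  rw [PySem.List.pyGetD_eq_getElem s.toList ' ' (by omega) (by push_cast; omega)]
                  simp
                rw [hgj] at hloopj
                constructor
                · intro heven
                  have : ¬ ((j : Int) % 2 ≠ 0) := by omega
                  rw [if_neg this] at hloopj
                  simpa using hloopj
                · intro hodd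
                  have : ((j : Int) % 2 ≠ 0) := by omega
                  rw [if_pos this] at hloopj
                  simpa using hloopj
          · intro hall i hi
            rw [PySem.List.mem_pyRange_one] at hi
            obtain ⟨hi1, hi2⟩ := hi
            have hjlt : i.toNat < s.toList.length := by omega
            have hgj : PySem.List.pyGetD s.toList i ' ' = s.toList[i.toNat]'hjlt := by
              rw [PySem.List.pyGetD_eq_getElem s.toList ' ' (by omega) (by push_cast; omega)]
            rw [hgj]
            have := hall i.toNat hjlt
            by_cases hpi : i % 2 ≠ 0
            · rw [if_pos hpi]
              have : PySem.Chars.isupper (s.toList[i.toNat]'hjlt) = false :=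
                this.2 (by omega)
              simp [this]
            · rw [if_neg hpi]
              have : PySem.Chars.islower (s.toList[i.toNat]'hjlt) = false :=
                this.1 (by omega)
              simp [this]
        · have hlf : PySem.Chars.islower (PySem.List.pyGetD s.toList (-1) ' ') = false :=
            Bool.not_eq_true _ ▸ (by simpa using hlw)
          rw [if_pos (by simp [hlf]), hlf]
          simp
      · have huf : PySem.Chars.isupper (PySem.List.pyGetD s.toList 0 ' ') = false := by
          simpa using hu
        rw [if_pos (by simp [huf]), huf]
        simp
    · have hc : ¬ ((s.toList.length : Int)) < 2 := by exact_mod_cast h2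
      have hcp : ((s.toList.length : Int) % 2 ≠ 0) := by omega
      rw [if_neg hc, if_pos hcp, if_pos (Or.inr hpar)]

-- ===== VERDICT (by name: the statement is the Claim_ definition above) =====
theorem check_spec : Claim_equal_check := by
  intro s _
  unfold Spec_check
  exact main_eq s
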